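-- pv_equiv track=rewrite | github.com/aifriend/nlp_tools | text_ner/lib/TextPreprocess.py | filter_token_min_occurrence
-- ===== SOURCE A (Python) =====
-- from collections import Counter
--
-- def filter_token_min_occurrence(dic_list: list, min_occur=2):
--     if not dic_list:
--         return dic_list
--
--     counter = Counter(dic_list)
--     token_list = [(k, c) for k, c in counter.items() if c >= min_occur]
--     sorted_token_list = list(map(
--         lambda x: x[0], sorted(token_list, key=lambda x: x[1], reverse=True)))
--
--     return sorted_token_list
-- ===== SOURCE B (Python) =====
-- from collections import Counter
--
-- def filter_token_min_occurrence(dic_list: list, min_occur=2):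
--     # Bucket (counting) concatenation instead of a comparison sort.
--     if not dic_list:
--         return dic_list
--     counter = Counter(dic_list)
--     lo = min_occur if min_occur > 1 else 1
--     maxc = max(counter.values())
--     buckets = {}
--     for tok, c in counter.items():
--         if c >= lo:
--             buckets[c] = buckets.get(c, []) + [tok]
--     result = []
--     for c in range(maxc, lo - 1, -1):
--         result = result + buckets.get(c, [])
--     return result
-- ===== Notes on version B (the rewrite author's own statement) =====
-- stated objective: alternative
-- what changed: Replaces the stable comparison sort of (token,count) pairs with a counting/bucket pass: tokens meeting the threshold are appended to per-count buckets in first-occurrence order and the buckets are concatenated from the maximum count down.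
import Mathlib
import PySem

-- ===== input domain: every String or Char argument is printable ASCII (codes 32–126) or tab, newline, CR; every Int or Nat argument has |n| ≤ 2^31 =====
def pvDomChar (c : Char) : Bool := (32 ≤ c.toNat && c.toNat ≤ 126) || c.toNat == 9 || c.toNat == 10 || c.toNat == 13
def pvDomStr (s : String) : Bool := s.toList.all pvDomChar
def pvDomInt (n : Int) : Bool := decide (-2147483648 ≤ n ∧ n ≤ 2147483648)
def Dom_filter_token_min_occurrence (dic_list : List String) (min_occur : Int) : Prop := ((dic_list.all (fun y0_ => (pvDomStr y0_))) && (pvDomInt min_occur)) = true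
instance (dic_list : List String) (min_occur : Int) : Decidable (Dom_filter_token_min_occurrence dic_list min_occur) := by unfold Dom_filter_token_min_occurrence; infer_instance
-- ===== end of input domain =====

-- B replaces the stable comparison sort by count with bucket concatenation (counting sort): alternative algorithm, same result.


-- ===== PORT A =====
def filter_token_min_occurrence (dic_list : List String) (min_occur : Int) : List String :=
  if dic_list = [] then dic_list
  else
    let counter := PySem.Dict.counter dic_list
    let token_list := counter.items.filter (fun kc => decide (min_occur ≤ kc.2))
    (PySem.List.sorted token_list (fun x => x.2) true).map (fun x => x.1)

-- ===== PORT B =====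
def filter_token_min_occurrence_alt (dic_list : List String) (min_occur : Int) : List String :=
  if dic_list = [] then dic_list
  else
    let counter := PySem.Dict.counter dic_list
    let lo : Int := if 1 < min_occur then min_occur else 1
    -- max(counter.values()): values is nonempty under the guard, so the .getD 0 default is unreachable
    let maxc : Int := (PySem.List.max? counter.values (fun v => v)).getD 0
    let buckets : PySem.Dict Int (List String) :=
      counter.items.foldl
        (fun b kc => if lo ≤ kc.2 then b.insert kc.2 (b.getD kc.2 [] ++ [kc.1]) else b)
        PySem.Dict.empty
    (PySem.List.pyRange maxc (lo - 1) (-1)).foldl (fun acc c => acc ++ buckets.getD c []) []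

-- ===== PRECONDITION & SPEC =====
def Spec_filter_token_min_occurrence (dic_list : List String) (min_occur : Int) (out : List String) : Prop := out = filter_token_min_occurrence_alt dic_list min_occur
instance (dic_list : List String) (min_occur : Int) (out : List String) : Decidable (Spec_filter_token_min_occurrence dic_list min_occur out) := by unfold Spec_filter_token_min_occurrence; infer_instance

-- ===== CLAIM (what is proved, stated in full; the proofs are below) =====
def Claim_equal_filter_token_min_occurrence : Prop := ∀ (dic_list : List String) (min_occur : Int), Dom_filter_token_min_occurrence dic_list min_occur → Spec_filter_token_min_occurrence dic_list min_occur (filter_token_min_occurrence dic_list min_occur)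

-- ===== LEMMAS AND PROOFS =====

-- insertBy walks past a prefix none of whose elements satisfy `before`
theorem insertBy_append_left {α : Type} (bf : α → α → Bool) (x : α) (l1 l2 : List α)
    (h : ∀ y ∈ l1, bf x y = false) :
    PySem.List.insertBy bf x (l1 ++ l2) = l1 ++ PySem.List.insertBy bf x l2 := by
  induction l1 with
  | nil => rfl
  | cons a t ih =>
      have ha : bf x a = false := h a (by simp)
      simp [PySem.List.insertBy, ha, ih (fun y hy => h y (by simp [hy]))]

-- insertBy puts x in front when every element satisfies `before`
theorem insertBy_front {α : Type} (bf : α → α → Bool) (x : α) (l : List α)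
    (h : ∀ y ∈ l, bf x y = true) :
    PySem.List.insertBy bf x l = x :: l := by
  cases l with
  | nil => rfl
  | cons a t => simp [PySem.List.insertBy, h a (by simp)]

-- inserting x into a bucket-shaped list appends it to its own bucket
theorem insertBy_buckets {α : Type} (key : α → Int) (x : α) (ds : List Int) (F : List α)
    (hds : ds.Pairwise (· > ·)) (hx : key x ∈ ds) :
    PySem.List.insertBy (fun a b => decide (key b < key a)) x
        (ds.flatMap (fun v => F.filter (fun y => decide (key y = v))))
      = ds.flatMap (fun v => (F ++ [x]).filter (fun y => decide (key y = v))) := by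
  induction ds with
  | nil => simp at hx
  | cons d t ih =>
      have hpt : t.Pairwise (· > ·) := hds.tail
      have hdt : ∀ v ∈ t, v < d := fun v hv => (List.pairwise_cons.mp hds).1 v hv
      by_cases hxd : key x = d
      · -- x goes to the first bucket
        have h1 : ∀ y ∈ F.filter (fun y => decide (key y = d)), (decide (key y < key x)) = false := by
          intro y hy
          have := (List.mem_filter.mp hy).2
          simp at this
          simp [this, hxd]
        have h2 : ∀ y ∈ t.flatMap (fun v => F.filter (fun y => decide (key y = v))),
            (decide (key y < key x)) = true := by
          intro y hy
          obtain ⟨v, hv, hyf⟩ := List.mem_flatMap.mp hy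
          have := (List.mem_filter.mp hyf).2
          simp at this
          simp [this, hxd]
          exact hdt v hv
        have h3 : ∀ v ∈ t, (F ++ [x]).filter (fun y => decide (key y = v))
            = F.filter (fun y => decide (key y = v)) := by
          intro v hv
          have : key x ≠ v := by
            intro he; have hv' := hdt v hv; rw [he] at hxd; omega
          simp [List.filter_append, this]
        rw [List.flatMap_cons, insertBy_append_left _ _ _ _ h1, insertBy_front _ _ _ h2]
        rw [List.flatMap_cons, List.filter_append, List.flatMap_congr h3]
        simp [hxd]
      · -- x belongs to a later bucket
        have hxt : key x ∈ t := by
          rcases List.mem_cons.mp hx with h | h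
          · exact absurd h hxd
          · exact h
        have hxlt : key x < d := hdt _ hxt
        have h1 : ∀ y ∈ F.filter (fun y => decide (key y = d)), (decide (key y < key x)) = false := by
          intro y hy
          have := (List.mem_filter.mp hy).2
          simp at this
          simp [this]; omega
        rw [List.flatMap_cons, insertBy_append_left _ _ _ _ h1, ih hpt hxt]
        rw [List.flatMap_cons, List.filter_append]
        have : x ∉ [x].filter (fun y => decide (key y = d)) := by simp [hxd]
        simp [List.filter_append, hxd]

-- stable descending sort by an Int key = concatenation of buckets taken in the (strictly decreasing) key order ds
theorem sorted_rev_eq_buckets {α : Type} (key : α → Int) (F : List α) (ds : List Int)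
    (hds : ds.Pairwise (· > ·)) (hF : ∀ x ∈ F, key x ∈ ds) :
    PySem.List.sorted F key true = ds.flatMap (fun v => F.filter (fun y => decide (key y = v))) := by
  rw [PySem.List.sorted_rev_eq_foldl_insertBy]
  induction F using List.reverseRecOn with
  | nil => simp
  | append_singleton F x ih =>
      rw [List.foldl_append, List.foldl_cons, List.foldl_nil,
        ih (fun y hy => hF y (by simp [hy]))]
      exact insertBy_buckets key x ds F hds (hF x (by simp))

-- the bucket-filling fold, characterised bucket by bucket
theorem fill_getD (lo : Int) (L : List (String × Int)) (c : Int) :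
    (L.foldl (fun b kc => if lo ≤ kc.2 then b.insert kc.2 (b.getD kc.2 [] ++ [kc.1]) else b)
        (PySem.Dict.empty : PySem.Dict Int (List String))).getD c []
      = ((L.filter (fun kc => decide (lo ≤ kc.2))).filter (fun kc => decide (kc.2 = c))).map (fun kc => kc.1) := by
  induction L using List.reverseRecOn with
  | nil => rfl
  | append_singleton L kc ih =>
      rw [List.foldl_append, List.foldl_cons, List.foldl_nil]
      by_cases h1 : lo ≤ kc.2
      · rw [if_pos h1, PySem.Dict.getD_insert]
        by_cases h2 : c = kc.2
        · subst h2
          rw [if_pos rfl, ih]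
          simp [List.filter_append, h1]
        · have hne : ¬(kc.2 = c) := fun h => h2 h.symm
          rw [if_neg h2, ih]
          simp [List.filter_append, hne]
      · rw [if_neg h1]
        simp [List.filter_append, h1, ih]

-- ===== VERDICT =====
theorem filter_token_min_occurrence_spec : Claim_equal_filter_token_min_occurrence := by
  intro dic_list min_occur _
  unfold Spec_filter_token_min_occurrence
  unfold filter_token_min_occurrence filter_token_min_occurrence_alt
  by_cases hnil : dic_list = []
  · simp [hnil]
  · simp only [if_neg hnil]
    set counter := PySem.Dict.counter dic_list with hc
    set lo : Int := if 1 < min_occur then min_occur else 1 with hlo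
    set maxc : Int := (PySem.List.max? counter.values (fun v => v)).getD 0 with hmax
    set items := counter.items with hitems
    -- every count appearing in items is positive and ≤ maxc
    have hitems_eq : items = (PySem.Set.ofList dic_list).map
        (fun k => (k, (dic_list.count k : Int))) := by
      rw [hitems, hc, PySem.Dict.items_counter]
    have hpos : ∀ kc ∈ items, 1 ≤ kc.2 := by
      intro kc hkc
      rw [hitems_eq] at hkc
      obtain ⟨k, hk, rfl⟩ := List.mem_map.mp hkc
      have : k ∈ dic_list := (PySem.Set.mem_ofList _ _).mp hk
      have := List.count_pos_iff.mpr this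
      simpa using this
    have hitems_ne : items ≠ [] := by
      obtain ⟨x, hx⟩ := List.exists_mem_of_ne_nil dic_list hnil
      have hx' : x ∈ PySem.Set.ofList dic_list := (PySem.Set.mem_ofList _ _).mpr hx
      rw [hitems_eq]
      simp only [ne_eq, List.map_eq_nil_iff]
      intro h; rw [h] at hx'; simp at hx'
    have hvalues_ne : counter.values ≠ [] := by
      intro h
      have h' : counter.items.map (fun kc => kc.2) = [] := h
      simp only [List.map_eq_nil_iff] at h'
      exact hitems_ne h'
    obtain ⟨m, hm⟩ : ∃ m, PySem.List.max? counter.values (fun v => v) = some m := by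
      cases hmm : PySem.List.max? counter.values (fun v => v) with
      | none => exact absurd ((PySem.List.max?_eq_none_iff _ _).mp hmm) hvalues_ne
      | some m => exact ⟨m, rfl⟩
    have hmaxc : maxc = m := by rw [hmax, hm]; rfl
    have hle_max : ∀ kc ∈ items, kc.2 ≤ maxc := by
      intro kc hkc
      have : kc.2 ∈ counter.values := by
        have : kc.2 ∈ counter.items.map (fun kc => kc.2) := List.mem_map.mpr ⟨kc, hkc, rfl⟩
        exact this
      have := PySem.List.max?_isMax hm _ this
      simpa [hmaxc] using this
    -- the two filters agree (counts are ≥ 1)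
    have hfilters : items.filter (fun kc => decide (min_occur ≤ kc.2))
        = items.filter (fun kc => decide (lo ≤ kc.2)) := by
      apply List.filter_congr
      intro kc hkc
      have := hpos kc hkc
      rw [hlo]
      by_cases h : 1 < min_occur
      · simp [h]
      · simp [h]; omega
    set F := items.filter (fun kc => decide (lo ≤ kc.2)) with hF
    set ds := PySem.List.pyRange maxc (lo - 1) (-1) with hds
    have hds_pairwise : ds.Pairwise (· > ·) := by
      rw [hds, PySem.List.pyRange_neg_one_eq_reverse]
      rw [List.pairwise_reverse]
      exact PySem.List.pairwise_lt_pyRange_one _ _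
    have hFmem : ∀ kc ∈ F, kc.2 ∈ ds := by
      intro kc hkc
      have h1 := (List.mem_filter.mp (hF ▸ hkc)).2
      have h2 := hle_max kc (List.mem_of_mem_filter (hF ▸ hkc))
      rw [hds, PySem.List.mem_pyRange_neg_one]
      simp at h1
      omega
    -- assemble
    rw [hfilters]
    rw [sorted_rev_eq_buckets (fun kc => kc.2) F ds hds_pairwise hFmem]
    rw [PySem.List.foldl_append_eq_flatMap, List.nil_append, List.map_flatMap]
    apply List.flatMap_congr
    intro c _
    rw [fill_getD lo items c]
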